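-- pv_equiv track=rewrite | github.com/rzeta-10/network-system-design | tutorials/t7/main.py | calculate_fragmentation
-- ===== SOURCE A (Python) =====
-- def calculate_fragmentation(mtu1, mtu2):
--     header_size = 20
--     payload_size = mtu1 - header_size
--     max_fragment_payload = mtu2 - header_size
--     max_fragment_payload = (max_fragment_payload // 8) * 8
--
--     fragments = []
--     bytes_sent = 0
--     fragment_number = 1
--
--     while bytes_sent < payload_size:
--         remaining_payload = payload_size - bytes_sent
--         if remaining_payload > max_fragment_payload:
--             send_data = max_fragment_payload
--             mf_flag = 1
--         else:
--             send_data = remaining_payload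
--             mf_flag = 0
--
--         total_length = send_data + header_size
--         offset_field = bytes_sent // 8
--
--         fragments.append((fragment_number, total_length, send_data, offset_field, mf_flag))
--
--         bytes_sent += send_data
--         fragment_number += 1
--
--     return fragments
-- ===== SOURCE B (Python) =====
-- def calculate_fragmentation(mtu1, mtu2):
--     header = 20
--     payload = mtu1 - header
--     maxf = ((mtu2 - header) // 8) * 8
--     if payload <= 0 or maxf <= 0:
--         return []
--     # build the fragment list BACK TO FRONT: repeatedly peel off the last
--     # fragment (its start = p-1 rounded down to a multiple of maxf), then reverse
--     result = []
--     p = payload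
--     mf = 0
--     while p > maxf:
--         cut = (p - 1) // maxf * maxf
--         last = p - cut
--         result.append((cut // maxf + 1, last + header, last, cut // 8, mf))
--         p = cut
--         mf = 1
--     result.append((1, p + header, p, 0, mf))
--     result.reverse()
--     return result
-- ===== Notes on version B (the rewrite author's own statement) =====
-- stated objective: alternative
-- what changed: Instead of A's forward accumulation (bytes_sent counter, fragments appended first-to-last), B builds the list back-to-front: it repeatedly peels off the LAST fragment, locating its start by rounding p-1 down to a multiple of the fragment size, emits fragments in reverse order, and reverses once at the end.
import Mathlib
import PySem

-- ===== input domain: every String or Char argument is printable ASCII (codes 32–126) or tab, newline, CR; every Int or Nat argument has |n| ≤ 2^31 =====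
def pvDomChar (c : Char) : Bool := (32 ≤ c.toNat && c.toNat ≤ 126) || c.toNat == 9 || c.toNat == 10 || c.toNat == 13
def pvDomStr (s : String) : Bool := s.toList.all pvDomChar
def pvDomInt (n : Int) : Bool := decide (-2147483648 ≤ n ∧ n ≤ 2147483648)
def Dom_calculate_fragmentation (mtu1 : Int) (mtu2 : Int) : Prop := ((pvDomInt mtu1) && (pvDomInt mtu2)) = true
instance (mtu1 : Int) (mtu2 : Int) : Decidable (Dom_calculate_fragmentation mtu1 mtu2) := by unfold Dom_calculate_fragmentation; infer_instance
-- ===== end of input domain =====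

-- B replaces A's forward while-loop (bytes_sent accumulator) by a back-to-front construction:
-- it peels off the LAST fragment each step, emits fragments in reverse order and reverses once (alternative decomposition).

-- ===== PORT A =====
-- A's while-loop; fuel makes the same computation total (inside Pre_ each
-- iteration sends at least one byte, so payload.toNat fuel always suffices).
def pvLoopA (payload maxf : Int) : Nat → Int → Int → List (Int × Int × Int × Int × Int)
  | 0, _, _ => []
  | fuel+1, bytes_sent, fragment_number =>
    if bytes_sent < payload then
      let remaining := payload - bytes_sent
      let sd_mf : Int × Int := if remaining > maxf then (maxf, 1) else (remaining, 0)
      let send_data := sd_mf.1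
      let mf_flag := sd_mf.2
      let total_length := send_data + 20
      let offset_field := PySem.Int.floordiv bytes_sent 8
      (fragment_number, total_length, send_data, offset_field, mf_flag) ::
        pvLoopA payload maxf fuel (bytes_sent + send_data) (fragment_number + 1)
    else []

def calculate_fragmentation (mtu1 : Int) (mtu2 : Int) : List (Int × Int × Int × Int × Int) :=
  let payload_size := mtu1 - 20
  let max_fragment_payload := (PySem.Int.floordiv (mtu2 - 20) 8) * 8
  pvLoopA payload_size max_fragment_payload payload_size.toNat 0 1

-- ===== PORT B =====
-- B's peeling while-loop, carried with the accumulated (reversed) result list;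
-- fuel makes the same computation total (cut < p at every step, so p.toNat fuel suffices).
def pvPeelB (maxf : Int) : Nat → Int → Int → List (Int × Int × Int × Int × Int) → List (Int × Int × Int × Int × Int)
  | 0, _, _, acc => acc
  | fuel+1, p, mf, acc =>
    if maxf < p then
      let cut := PySem.Int.floordiv (p - 1) maxf * maxf
      let last := p - cut
      pvPeelB maxf fuel cut 1
        (acc ++ [(PySem.Int.floordiv cut maxf + 1, last + 20, last, PySem.Int.floordiv cut 8, mf)])
    else acc ++ [(1, p + 20, p, 0, mf)]

def calculate_fragmentation_alt (mtu1 : Int) (mtu2 : Int) : List (Int × Int × Int × Int × Int) :=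
  let payload := mtu1 - 20
  let maxf := (PySem.Int.floordiv (mtu2 - 20) 8) * 8
  if payload ≤ 0 ∨ maxf ≤ 0 then []
  else (pvPeelB maxf payload.toNat payload 0 []).reverse

-- ===== PRECONDITION & SPEC =====
-- Pre_ excludes exactly the inputs where A never returns: mtu1 - 20 > 0 together with
-- ((mtu2 - 20)//8)*8 ≤ 0 makes A's while-loop run forever (bytes_sent never increases).
def Pre_calculate_fragmentation (mtu1 : Int) (mtu2 : Int) : Prop :=
  mtu1 - 20 ≤ 0 ∨ 0 < (PySem.Int.floordiv (mtu2 - 20) 8) * 8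
instance (mtu1 : Int) (mtu2 : Int) : Decidable (Pre_calculate_fragmentation mtu1 mtu2) := by
  unfold Pre_calculate_fragmentation; infer_instance
def pvWitness_calculate_fragmentation : Int × Int := (120, 60)

def Spec_calculate_fragmentation (mtu1 : Int) (mtu2 : Int) (out : List (Int × Int × Int × Int × Int)) : Prop := out = calculate_fragmentation_alt mtu1 mtu2
instance (mtu1 : Int) (mtu2 : Int) (out : List (Int × Int × Int × Int × Int)) : Decidable (Spec_calculate_fragmentation mtu1 mtu2 out) := by unfold Spec_calculate_fragmentation; infer_instance

-- ===== CLAIM (what is proved, stated in full; the proofs are below) =====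
def Claim_equal_calculate_fragmentation : Prop := ∀ (mtu1 : Int) (mtu2 : Int), Dom_calculate_fragmentation mtu1 mtu2 → Pre_calculate_fragmentation mtu1 mtu2 → Spec_calculate_fragmentation mtu1 mtu2 (calculate_fragmentation mtu1 mtu2)

-- ===== LEMMAS AND PROOFS =====

-- ceiling-division bracket: count > k ↔ payload > k * maxf  (0 < maxf)
theorem pv_count_gt {P M k : Int} (hM : 0 < M) :
    k < PySem.Int.floordiv (P + M - 1) M ↔ k * M < P := by
  rw [show (k < PySem.Int.floordiv (P + M - 1) M) ↔ (k + 1 ≤ PySem.Int.floordiv (P + M - 1) M) from Int.lt_iff_add_one_le,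
      PySem.Int.le_floordiv_iff_mul_le hM]
  constructor <;> intro h <;> nlinarith

-- pinning a floor division by its bracket
theorem pv_floordiv_eq {x M q : Int} (hM : 0 < M) (h1 : q * M ≤ x) (h2 : x < (q + 1) * M) :
    PySem.Int.floordiv x M = q := by
  have ha : q ≤ PySem.Int.floordiv x M := (PySem.Int.le_floordiv_iff_mul_le hM).mpr h1
  have hb : PySem.Int.floordiv x M < q + 1 := (PySem.Int.floordiv_lt_iff_lt_mul hM).mpr h2
  omega

-- forward-order recursive description of B's peeling loop (proof helper)
def pvBuildRec (maxf : Int) : Nat → Int → Int → List (Int × Int × Int × Int × Int)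
  | 0, _, _ => []
  | fuel+1, p, mf =>
    if p ≤ maxf then [(1, p + 20, p, 0, mf)]
    else
      let cut := PySem.Int.floordiv (p - 1) maxf * maxf
      let last := p - cut
      pvBuildRec maxf fuel cut 1 ++
        [(PySem.Int.floordiv cut maxf + 1, last + 20, last, PySem.Int.floordiv cut 8, mf)]

-- the peeling loop accumulates exactly the reverse of pvBuildRec
theorem pvPeelB_eq {M : Int} :
    ∀ (fuel : Nat) (p mf : Int) (acc : List (Int × Int × Int × Int × Int)),
    pvPeelB M fuel p mf acc = acc ++ (pvBuildRec M fuel p mf).reverse := by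
  intro fuel
  induction fuel with
  | zero => intro p mf acc; rw [pvPeelB, pvBuildRec]; simp
  | succ n ih =>
    intro p mf acc
    rw [pvPeelB, pvBuildRec]
    by_cases h : M < p
    · rw [if_pos h, if_neg (by omega)]
      rw [ih]
      simp
    · rw [if_neg h, if_pos (by omega)]
      simp

-- the index-driven map both ports are compared with
def pvFrag (P M c : Int) (mf : Int) (j : Int) : Int × Int × Int × Int × Int :=
  let offset_bytes := j * M
  let send_data := min M (P - offset_bytes)
  (j + 1, send_data + 20, send_data, PySem.Int.floordiv offset_bytes 8,
   if j < c - 1 then (1 : Int) else mf)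

-- A's loop ↔ index form: starting at bytes_sent = i * M, fragment i+1
theorem pvLoopA_eq_map {P M : Int} (hM : 0 < M) (count : Int)
    (hcount : count = PySem.Int.floordiv (P + M - 1) M) :
    ∀ (fuel : Nat) (i : Int), 0 ≤ i → (P - i * M).toNat ≤ fuel →
    pvLoopA P M fuel (i * M) (i + 1) =
      (PySem.List.pyRange i count 1).map (pvFrag P M count 0) := by
  intro fuel
  induction fuel with
  | zero =>
    intro i hi hfuel
    have hiP : P - i * M ≤ 0 := by omega
    have : ¬ i < count := by
      rw [hcount, pv_count_gt hM]; omega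
    rw [pvLoopA]
    rw [show PySem.List.pyRange i count 1 = [] from by
      simp [PySem.List.pyRange_one, show (count - i).toNat = 0 from by omega]]
    simp
  | succ n ih =>
    intro i hi hfuel
    by_cases hlt : i * M < P
    · have hic : i < count := by rw [hcount, pv_count_gt hM]; exact hlt
      rw [pvLoopA, if_pos hlt, PySem.List.pyRange_one_cons hic]
      by_cases hrem : P - i * M > M
      · -- full fragment, mf = 1
        have harg : i * M + M = (i + 1) * M := by ring
        have hnext : (i + 1) * M < P := by omega
        have h1 : i < count - 1 := by
          have := (pv_count_gt hM (k := i + 1) (P := P)).mpr hnext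
          omega
        have hfb : (P - (i + 1) * M).toNat ≤ n := by
          have h2 : P - (i + 1) * M = P - i * M - M := by ring
          omega
        simp only [if_pos hrem, List.map_cons]
        rw [harg]
        rw [ih (i + 1) (by omega) hfb]
        have hmin : min M (P - i * M) = M := by omega
        simp [pvFrag, hmin, h1]
      · -- last fragment, mf = 0
        have h1 : ¬ i + 1 ≤ count - 1 := by
          intro h
          have harg2 : (i + 1) * M = i * M + M := by ring
          have := (pv_count_gt hM (k := i + 1) (P := P)).mp (by omega)
          omega
        simp only [if_neg hrem, List.map_cons]
        have hmin : min M (P - i * M) = P - i * M := by omega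
        have hempty : PySem.List.pyRange (i + 1) count 1 = [] := by
          simp [PySem.List.pyRange_one, show (count - (i + 1)).toNat = 0 from by omega]
        have hstop : ∀ m fn, pvLoopA P M m (i * M + (P - i * M)) fn = [] := by
          intro m fn
          cases m with
          | zero => rw [pvLoopA]
          | succ m' => rw [pvLoopA, if_neg (by omega)]
        rw [hstop]
        simp [pvFrag, hempty, hmin, show ¬ i < count - 1 from by omega]
    · rw [pvLoopA, if_neg hlt]
      rw [show PySem.List.pyRange i count 1 = [] from by
        simp [PySem.List.pyRange_one,
          show (count - i).toNat = 0 from by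
            have : ¬ i < count := by rw [hcount, pv_count_gt hM]; omega
            omega]]
      simp

-- B's back-to-front recursion ↔ index form, for a prefix of p bytes whose last flag is mf
theorem pvBuildRec_eq_map {M : Int} (hM : 0 < M) :
    ∀ (fuel : Nat) (p mf : Int), 0 < p → p.toNat ≤ fuel →
    pvBuildRec M fuel p mf =
      (PySem.List.pyRange 0 (PySem.Int.floordiv (p + M - 1) M) 1).map
        (pvFrag p M (PySem.Int.floordiv (p + M - 1) M) mf) := by
  intro fuel
  induction fuel with
  | zero => intro p mf hp hf; omega
  | succ n ih =>
    intro p mf hp hf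
    by_cases hple : p ≤ M
    · -- single fragment, c = 1
      have hc : PySem.Int.floordiv (p + M - 1) M = 1 := by
        apply pv_floordiv_eq hM <;> nlinarith
      rw [pvBuildRec, if_pos hple, hc]
      rw [show PySem.List.pyRange 0 1 1 = [0] from by decide]
      have hmin : min M (p - 0 * M) = p := by simp; omega
      simp [pvFrag, hple]
    · -- peel the last fragment
      set q := PySem.Int.floordiv (p - 1) M with hq
      have hq1 : q * M ≤ p - 1 := (PySem.Int.le_floordiv_iff_mul_le hM).mp (le_refl q)
      have hq2 : p - 1 < (q + 1) * M := (PySem.Int.floordiv_lt_iff_lt_mul hM).mp (by omega)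
      have hqpos : 1 ≤ q := by
        rw [hq, PySem.Int.le_floordiv_iff_mul_le hM]; omega
      have hcutpos : 0 < q * M := by positivity
      have hcutlt : q * M < p := by omega
      have hc : PySem.Int.floordiv (p + M - 1) M = q + 1 := by
        apply pv_floordiv_eq hM
        · nlinarith
        · nlinarith
      have hccut : PySem.Int.floordiv (q * M + M - 1) M = q := by
        apply pv_floordiv_eq hM
        · omega
        · nlinarith
      have hqM : PySem.Int.floordiv (q * M) M = q := by
        apply pv_floordiv_eq hM
        · omega
        · nlinarith
      rw [pvBuildRec, if_neg (by omega)]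
      simp only [← hq]
      rw [ih (q * M) 1 hcutpos (by omega), hccut, hc]
      rw [PySem.List.pyRange_one_append 0 q (q + 1) (by omega) (by omega)]
      rw [show PySem.List.pyRange q (q + 1) 1 = [q] from by
        rw [PySem.List.pyRange_one_cons (by omega)]
        simp]
      rw [List.map_append]
      congr 1
      · -- prefix fragments agree
        apply List.map_congr_left
        intro j hj
        have hjb := (PySem.List.mem_pyRange_one.mp hj)
        have hjq : j < q := hjb.2
        have hj0 : 0 ≤ j := hjb.1
        have hm1 : min M (q * M - j * M) = M := by
          have : M ≤ q * M - j * M := by nlinarith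
          omega
        have hm2 : min M (p - j * M) = M := by
          have : q * M - j * M ≤ p - j * M := by omega
          omega
        simp [pvFrag, hm1, hm2, show j < q from hjq]
      · -- the peeled last fragment
        have hqq : (q + 1) * M = q * M + M := by ring
        have hmin : min M (p - q * M) = p - q * M := by omega
        simp [pvFrag, hqM, hmin]

-- ===== VERDICT (by name: the statement is the Claim_ definition above) =====
theorem calculate_fragmentation_spec : Claim_equal_calculate_fragmentation := by
  intro mtu1 mtu2 _ hpre
  unfold Spec_calculate_fragmentation
  dsimp only [calculate_fragmentation, calculate_fragmentation_alt]
  set P := mtu1 - 20 with hP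
  set M := (PySem.Int.floordiv (mtu2 - 20) 8) * 8 with hMdef
  by_cases hPpos : P ≤ 0
  · have hPnat : P.toNat = 0 := by omega
    rw [hPnat, if_pos (Or.inl hPpos)]
    rw [pvLoopA]
  · have hM : 0 < M := by
      rcases hpre with h | h
      · omega
      · exact h
    rw [if_neg (by omega)]
    rw [pvPeelB_eq, List.nil_append, List.reverse_reverse]
    rw [pvBuildRec_eq_map hM P.toNat P 0 (by omega) le_rfl]
    have := pvLoopA_eq_map hM (PySem.Int.floordiv (P + M - 1) M) rfl P.toNat 0 le_rfl (by omega)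
    simpa using this
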